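-- pv_equiv track=rewrite | github.com/freer4an/TechOrda | python/легкие вопросы/min.py | min_arr
-- ===== SOURCE A (Python) =====
-- def min_arr(arr: list[int]):
--     if len(arr) == 0:
--         return 0
--
--     res = arr[0]
--     for i in range(1, len(arr)):
--         if res > arr[i]:
--             res = arr[i]
--
--     return res
-- ===== SOURCE B (Python) =====
-- def min_arr(arr: list[int]):
--     if len(arr) == 0:
--         return 0
--     return sorted(arr)[0]
-- ===== Notes on version B (the rewrite author's own statement) =====
-- stated objective: idiomatic
-- what changed: Replaces the manual comparison loop with sort-then-take-first: after the same empty-list guard, B returns the first element of the sorted copy of the list.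
import Mathlib
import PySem

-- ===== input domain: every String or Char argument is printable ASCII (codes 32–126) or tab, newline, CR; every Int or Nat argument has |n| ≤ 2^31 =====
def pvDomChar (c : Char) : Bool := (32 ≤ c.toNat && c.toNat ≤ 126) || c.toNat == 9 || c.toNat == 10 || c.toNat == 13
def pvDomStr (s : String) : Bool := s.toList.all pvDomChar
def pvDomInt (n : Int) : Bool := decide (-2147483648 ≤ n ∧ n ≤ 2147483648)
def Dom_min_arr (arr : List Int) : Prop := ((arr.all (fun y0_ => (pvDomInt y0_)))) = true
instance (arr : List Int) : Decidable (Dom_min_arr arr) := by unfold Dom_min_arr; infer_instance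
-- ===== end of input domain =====

-- B replaces A's comparison loop with sort-then-take-first (same empty-list guard); neither implementation mutates its argument.

-- ===== PORT A =====
def min_arr (arr : List Int) : Int :=
  if arr.length = 0 then 0
  else
    (PySem.List.pyRange 1 arr.length 1).foldl
      (fun res i =>
        let ai := PySem.List.pyGetD arr i 0
        if res > ai then ai else res)
      (PySem.List.pyGetD arr 0 0)

-- ===== PORT B =====
def min_arr_alt (arr : List Int) : Int :=
  if arr.length = 0 then 0
  else PySem.List.pyGetD (PySem.List.sorted arr (fun x => x) false) 0 0

-- ===== PRECONDITION & SPEC =====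
def Spec_min_arr (arr : List Int) (out : Int) : Prop := out = min_arr_alt arr
instance (arr : List Int) (out : Int) : Decidable (Spec_min_arr arr out) := by unfold Spec_min_arr; infer_instance

-- ===== CLAIM (what is proved, stated in full; the proofs are below) =====
def Claim_equal_min_arr : Prop := ∀ (arr : List Int), Dom_min_arr arr → Spec_min_arr arr (min_arr arr)

-- ===== LEMMAS AND PROOFS =====

-- the loop's fold computes an element that is ≤ every element of a :: t
theorem pv_fold_mem_le (t : List Int) (a : Int) :
    (t.foldl (fun res ai => if res > ai then ai else res) a) ∈ a :: t ∧
    ∀ y ∈ a :: t, (t.foldl (fun res ai => if res > ai then ai else res) a) ≤ y := by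
  induction t generalizing a with
  | nil => simp
  | cons b t ih =>
    simp only [List.foldl_cons]
    by_cases h : a > b
    · simp only [if_pos h]
      obtain ⟨hm, hle⟩ := ih b
      refine ⟨List.mem_cons_of_mem a hm, ?_⟩
      intro y hy
      rw [List.mem_cons] at hy
      rcases hy with h1 | hy
      · exact le_of_le_of_eq (le_trans (hle b (List.mem_cons_self ..)) (le_of_lt h)) h1.symm
      · exact hle y hy
    · simp only [if_neg h]
      obtain ⟨hm, hle⟩ := ih a
      refine ⟨?_, ?_⟩
      · rw [List.mem_cons] at hm ⊢
        rcases hm with h' | h'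
        · exact Or.inl h'
        · exact Or.inr (List.mem_cons_of_mem b h')
      · intro y hy
        rw [List.mem_cons, List.mem_cons] at hy
        rcases hy with h1 | h1 | hy
        · exact le_of_le_of_eq (hle a (List.mem_cons_self ..)) h1.symm
        · exact le_of_le_of_eq (le_trans (hle a (List.mem_cons_self ..)) (le_of_not_gt h)) h1.symm
        · exact hle y (List.mem_cons_of_mem a hy)

-- A's indexed loop over range(1, len) is the fold of the same body over the tail
theorem pv_minA_eq (a : Int) (t : List Int) :
    min_arr (a :: t) = t.foldl (fun res ai => if res > ai then ai else res) a := by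
  unfold min_arr
  rw [if_neg (by simp)]
  have := PySem.List.foldl_pyRange_pyGetD (a := 1) (xs := a :: t) (d := 0)
    (f := fun res ai => if res > ai then ai else res)
    (init := PySem.List.pyGetD (a :: t) 0 0) (by norm_num)
  simpa [PySem.List.pyGetD_zero_cons] using this

-- ===== VERDICT (by name: the statement is the Claim_ definition above) =====
theorem min_arr_spec : Claim_equal_min_arr := by
  intro arr _
  unfold Spec_min_arr
  cases arr with
  | nil => simp [min_arr, min_arr_alt]
  | cons a t =>
    rw [pv_minA_eq]
    unfold min_arr_alt
    rw [if_neg (by simp)]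
    obtain ⟨hm, hle⟩ := pv_fold_mem_le t a
    have hlen : (PySem.List.sorted (a :: t) (fun x => x) false).length = t.length + 1 := by
      simp [PySem.List.length_sorted]
    cases hs : PySem.List.sorted (a :: t) (fun x => x) false with
    | nil => simp [hs] at hlen
    | cons m s =>
      rw [PySem.List.pyGetD_zero_cons]
      have hhead := PySem.List.key_head_sorted_le (xs := a :: t) (key := fun x => x) hs
      have hmmem : m ∈ a :: t := by
        rw [← PySem.List.mem_sorted (xs := a :: t) (key := fun x => x) (rev := false), hs]
        simp
      exact le_antisymm (hle m hmmem) (hhead _ hm)
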